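-- pv_equiv track=rewrite | github.com/jasminextan/markdown_compiler | markdown_compiler.py | compile_strikethrough
-- ===== SOURCE A (Python) =====
-- def compile_strikethrough(line):
--     '''
--     Convert "~~strikethrough~~" to "<ins>strikethrough</ins>".
--
--     HINT:
--     The strikethrough annotations are very similar to implement as the italic function.
--     The difference is that there are two delimiting characters instead of one.
--     This will require carefully thinking about the range of your for loop and all of your list indexing.
--
--     >>> compile_strikethrough('~~This is strikethrough!~~ This is not strikethrough.')
--     '<ins>This is strikethrough!</ins> This is not strikethrough.'
--     >>> compile_strikethrough('~~This is strikethrough!~~')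
--     '<ins>This is strikethrough!</ins>'
--     >>> compile_strikethrough('This is ~~strikethrough~~!')
--     'This is <ins>strikethrough</ins>!'
--     >>> compile_strikethrough('This is not ~~strikethrough!')
--     'This is not ~~strikethrough!'
--     >>> compile_strikethrough('~~')
--     '~~'
--     '''
--     secondstar = False
--     firststar = False
--     starcheck = False
--     linetwo = ''
--     linethree = '<ins>'
--     linefour = '</ins>'
--     x = 0
--     for c in line:
--         if c == '~':
--             starcheck = True
--             x += 1
--         if firststar == True and starcheck == True and x%2==0:
--             linetwo += linefour
--             secondstar = True
--             firststar = False
--         elif firststar == False and starcheck == True and x%2==0: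
--             linetwo += linethree
--             firststar = True
--             secondstar = False
--         if c!= '~':
--             linetwo += c
--         starcheck = False
--     if secondstar == False:
--         return (line)
--     return(linetwo)
-- ===== SOURCE B (Python) =====
-- def compile_strikethrough(line):
--     # Treat every second tilde as completing a "~~" delimiter; delimiters
--     # alternate between opening and closing tags.  The converted line is kept
--     # only when the markup ends balanced (at least one strikethrough was
--     # opened and the last one was closed); otherwise the line stays as it is.
--     parts = line.split('~')
--     out = [parts[0]]
--     open_tag = False
--     balanced = False
--     for i, part in enumerate(parts[1:], start=1):
--         if i % 2 == 0:
--             if open_tag: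
--                 out.append('</ins>')
--                 balanced = True
--             else:
--                 out.append('<ins>')
--                 balanced = False
--             open_tag = not open_tag
--         out.append(part)
--     return ''.join(out) if balanced else line
-- ===== Notes on version B (the rewrite author's own statement) =====
-- stated objective: faster
-- what changed: B replaces A's character-by-character scan with a running tilde counter and three boolean flags by one str.split on the tilde character and a loop over segment boundaries that alternates opening/closing tags and keeps the converted line only if the markup ended balanced.
import Mathlib
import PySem

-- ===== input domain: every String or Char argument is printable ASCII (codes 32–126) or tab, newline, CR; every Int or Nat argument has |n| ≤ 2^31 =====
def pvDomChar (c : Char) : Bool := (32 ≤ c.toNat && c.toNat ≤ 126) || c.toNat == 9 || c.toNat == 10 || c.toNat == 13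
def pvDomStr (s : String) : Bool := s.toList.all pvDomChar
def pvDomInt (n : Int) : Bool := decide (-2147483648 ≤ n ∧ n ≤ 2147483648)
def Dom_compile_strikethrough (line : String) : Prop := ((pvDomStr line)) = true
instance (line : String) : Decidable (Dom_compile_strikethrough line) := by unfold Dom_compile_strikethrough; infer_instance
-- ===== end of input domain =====

-- B replaces A's character-by-character tilde counter and flag machine by one split on the
-- tilde character plus a boundary loop that alternates open/close tags (measured faster: split/join at C speed vs a per-character Python loop).


-- ===== PORT A =====
-- one loop iteration of A: state = (secondstar, firststar, linetwo, x); starcheck is local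
def stepA (st : Bool × Bool × List Char × Int) (c : Char) : Bool × Bool × List Char × Int :=
  match st with
  | (second, first, linetwo, x) =>
    let starcheck : Bool := c == '~'
    let x : Int := if c == '~' then x + 1 else x
    let (second, first, linetwo) :=
      if first = true ∧ starcheck = true ∧ PySem.Int.mod x 2 = 0 then
        (true, false, linetwo ++ "</ins>".toList)
      else if first = false ∧ starcheck = true ∧ PySem.Int.mod x 2 = 0 then
        (false, true, linetwo ++ "<ins>".toList)
      else (second, first, linetwo)
    let linetwo := if ¬ (c == '~') then linetwo ++ [c] else linetwo
    (second, first, linetwo, x)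

def compile_strikethrough (line : String) : String :=
  let st := line.toList.foldl stepA (false, false, ([] : List Char), 0)
  if st.1 = false then line else String.ofList st.2.2.1

-- ===== PORT B =====
-- one iteration of B's boundary loop: state = (out, open_tag, balanced); ip = (i, part)
def stepB (st : List (List Char) × Bool × Bool) (ip : Int × List Char) : List (List Char) × Bool × Bool :=
  match st with
  | (out, opn, balanced) =>
    if PySem.Int.mod ip.1 2 = 0 then
      let (out, balanced) :=
        if opn then (out ++ ["</ins>".toList], true) else (out ++ ["<ins>".toList], false)
      (out ++ [ip.2], !opn, balanced)
    else (out ++ [ip.2], opn, balanced)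

def compile_strikethrough_alt (line : String) : String :=
  let parts := (PySem.Chars.split? line.toList ['~']).getD []
  let st := (PySem.List.enumerate (parts.drop 1) 1).foldl stepB ([parts.headI], false, false)
  if st.2.2 = true then String.ofList (PySem.Chars.join [] st.1) else line

-- ===== PRECONDITION & SPEC =====
def Spec_compile_strikethrough (line : String) (out : String) : Prop := out = compile_strikethrough_alt line
instance (line : String) (out : String) : Decidable (Spec_compile_strikethrough line out) := by unfold Spec_compile_strikethrough; infer_instance

-- ===== CLAIM (what is proved, stated in full; the proofs are below) =====
def Claim_equal_compile_strikethrough : Prop := ∀ (line : String), Dom_compile_strikethrough line → Spec_compile_strikethrough line (compile_strikethrough line)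

-- ===== LEMMAS AND PROOFS =====

-- natural left-to-right split on '~' (proof-side model of Chars.splitOn · ['~'])
def sp : List Char → List (List Char)
  | [] => [[]]
  | c :: cs => if c = '~' then [] :: sp cs else (c :: (sp cs).headI) :: (sp cs).tail

-- A's flags as functions of the running tilde count
def firstOf (k : Nat) : Bool := decide ((k / 2) % 2 = 1)
def secondOf (k : Nat) : Bool := decide (4 ≤ k ∧ (k / 2) % 2 = 0)

-- the t-th tag emitted
def tagN (t : Nat) : List Char := if t % 2 = 1 then "<ins>".toList else "</ins>".toList

-- A's linetwo contribution of cs when k tildes were already seen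
def build (k : Nat) : List Char → List Char
  | [] => []
  | c :: cs =>
    if c = '~' then (if (k + 1) % 2 = 0 then tagN ((k + 1) / 2) else []) ++ build (k + 1) cs
    else c :: build k cs

-- flattened output of the segments after boundary i (B's loop, proof side)
def J (i : Nat) : List (List Char) → List Char
  | [] => []
  | p :: ps => (if i % 2 = 1 then [] else tagN (i / 2)) ++ p ++ J (i + 1) ps

-- B's out-list contribution for segments ps after i boundaries already passed
def segs (i : Nat) : List (List Char) → List (List Char)
  | [] => []
  | p :: ps => (if (i + 1) % 2 = 0 then [tagN ((i + 1) / 2)] else []) ++ p :: segs (i + 1) ps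

lemma sp_ne_nil (cs : List Char) : sp cs ≠ [] := by
  cases cs with
  | nil => simp [sp]
  | cons c cs => by_cases h : c = '~' <;> simp [sp, h]

lemma sp_cons_eq (cs : List Char) : sp cs = (sp cs).headI :: (sp cs).tail := by
  cases h : sp cs with
  | nil => exact absurd h (sp_ne_nil cs)
  | cons p ps => simp

lemma sp_length (cs : List Char) : (sp cs).length = cs.count '~' + 1 := by
  induction cs with
  | nil => simp [sp]
  | cons c cs ih =>
    by_cases h : c = '~'
    · simp [sp, h, ih]
    · rw [sp, if_neg h]
      simp [h, ← ih]
      rw [sp_cons_eq cs]; simp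

lemma splitOn_go_tilde (cs : List Char) (fuel : Nat) (hf : cs.length ≤ fuel)
    (cur : List Char) (acc : List (List Char)) :
    PySem.Chars.splitOn.go ['~'] fuel cs cur acc
      = acc.reverse ++ ((cur.reverse ++ (sp cs).headI) :: (sp cs).tail) := by
  induction cs generalizing fuel cur acc with
  | nil => cases fuel <;> simp [PySem.Chars.splitOn.go, sp]
  | cons c cs ih =>
    cases fuel with
    | zero => simp at hf
    | succ f =>
      by_cases h : c = '~'
      · subst h
        rw [PySem.Chars.splitOn.go, if_pos (by simp [List.isPrefixOf])]
        simp only [List.length_singleton, List.drop_succ_cons, List.drop_zero]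
        rw [ih f (by simpa using hf) [] (cur.reverse :: acc)]
        rw [sp, if_pos rfl]
        rw [sp_cons_eq cs]
        simp
      · rw [PySem.Chars.splitOn.go, if_neg (by simp [List.isPrefixOf]; exact fun e => h e.symm)]
        rw [ih f (by simpa using hf) (c :: cur) acc]
        rw [sp, if_neg h]
        simp

lemma splitOn_eq_sp (cs : List Char) : PySem.Chars.splitOn cs ['~'] = sp cs := by
  rw [PySem.Chars.splitOn, splitOn_go_tilde cs (cs.length + 1) (by omega) [] []]
  simpa using (sp_cons_eq cs).symm

lemma build_eq_sp (cs : List Char) (k : Nat) :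
    build k cs = (sp cs).headI ++ J (k + 1) ((sp cs).tail) := by
  induction cs generalizing k with
  | nil => simp [build, sp, J]
  | cons c cs ih =>
    by_cases h : c = '~'
    · rw [build, if_pos h, sp, if_pos h, ih (k + 1)]
      simp only [List.headI_cons, List.tail_cons, List.nil_append]
      conv_rhs => rw [sp_cons_eq cs]
      simp only [J]
      by_cases he : (k + 1) % 2 = 1
      · simp [he]
      · simp [show (k + 1) % 2 = 0 by omega]
    · rw [build, if_neg h, sp, if_neg h, ih k]
      simp

lemma stepA_eq (second first : Bool) (acc : List Char) (k : Nat) (c : Char) :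
    stepA (second, first, acc, (k : Int)) c =
      if c = '~' then
        (if (k + 1) % 2 = 0 then
           (if first then (true, false, acc ++ "</ins>".toList, (k : Int) + 1)
            else (false, true, acc ++ "<ins>".toList, (k : Int) + 1))
         else (second, first, acc, (k : Int) + 1))
      else (second, first, acc ++ [c], (k : Int)) := by
  by_cases h : c = '~'
  · rw [if_pos h]
    by_cases he : (k + 1) % 2 = 0
    · have hd : (2 : Int) ∣ ((k : Int) + 1) := by omega
      by_cases hf : first
      · simp [stepA, h, hf, hd, he]
      · simp [stepA, h, hf, hd, he]
    · have hd : ¬ (2 : Int) ∣ ((k : Int) + 1) := by omega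
      simp [stepA, h, hd, he]
  · simp [stepA, h]

lemma foldA (cs : List Char) (k : Nat) (acc : List Char) :
    cs.foldl stepA (secondOf k, firstOf k, acc, (k : Int))
      = (secondOf (k + cs.count '~'), firstOf (k + cs.count '~'),
         acc ++ build k cs, ((k + cs.count '~' : Nat) : Int)) := by
  induction cs generalizing k acc with
  | nil => simp [build]
  | cons c cs ih =>
    rw [List.foldl_cons, stepA_eq]
    have hx : ((k : Int) + 1) = ((k + 1 : Nat) : Int) := by push_cast; ring
    by_cases h : c = '~'
    · rw [if_pos h, hx]
      have hcnt : (c :: cs).count '~' = cs.count '~' + 1 := by simp [h]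
      have hk : k + (c :: cs).count '~' = (k + 1) + cs.count '~' := by rw [hcnt]; ring
      by_cases he : (k + 1) % 2 = 0
      · rw [if_pos he]
        by_cases hf : firstOf k = true
        · rw [if_pos hf]
          have h1 : secondOf (k + 1) = true := by
            simp only [secondOf, decide_eq_true_iff]
            simp only [firstOf, decide_eq_true_iff] at hf
            omega
          have h2 : firstOf (k + 1) = false := by
            simp only [firstOf, decide_eq_false_iff_not]
            simp only [firstOf, decide_eq_true_iff] at hf
            omega
          have htag : build k (c :: cs) = "</ins>".toList ++ build (k + 1) cs := by
            rw [build, if_pos h, if_pos he, tagN, if_neg (by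
              simp only [firstOf, decide_eq_true_iff] at hf; omega)]
          rw [← h1, ← h2, ih (k + 1) (acc ++ "</ins>".toList), hk, htag,
            List.append_assoc]
        · rw [if_neg hf]
          have hf' : (k / 2) % 2 = 0 := by
            simp only [firstOf, decide_eq_true_iff] at hf; omega
          have h1 : secondOf (k + 1) = false := by
            simp only [secondOf, decide_eq_false_iff_not]; omega
          have h2 : firstOf (k + 1) = true := by
            simp only [firstOf, decide_eq_true_iff]; omega
          have htag : build k (c :: cs) = "<ins>".toList ++ build (k + 1) cs := by
            rw [build, if_pos h, if_pos he, tagN, if_pos (by omega)]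
          rw [← h1, ← h2, ih (k + 1) (acc ++ "<ins>".toList), hk, htag,
            List.append_assoc]
      · rw [if_neg he]
        have h1 : secondOf (k + 1) = secondOf k := by
          simp only [secondOf]
          have : (k + 1) / 2 = k / 2 ∧ (4 ≤ k + 1 ↔ 4 ≤ k) := by omega
          rw [this.1]
          exact decide_eq_decide.mpr (by rw [this.2])
        have h2 : firstOf (k + 1) = firstOf k := by
          simp only [firstOf]
          have : (k + 1) / 2 = k / 2 := by omega
          rw [this]
        have htag : build k (c :: cs) = build (k + 1) cs := by
          rw [build, if_pos h, if_neg he, List.nil_append]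
        rw [← h1, ← h2, ih (k + 1) acc, hk, htag]
    · rw [if_neg h]
      have hcnt : (c :: cs).count '~' = cs.count '~' := by simp [h]
      have htag : build k (c :: cs) = c :: build k cs := by rw [build, if_neg h]
      rw [ih k (acc ++ [c]), hcnt, htag, List.append_assoc, List.singleton_append]

lemma foldB (ps : List (List Char)) (i : Nat) (acc : List (List Char)) :
    (PySem.List.enumerate ps ((i : Int) + 1)).foldl stepB (acc, firstOf i, secondOf i)
      = (acc ++ segs i ps, firstOf (i + ps.length), secondOf (i + ps.length)) := by
  induction ps generalizing i acc with
  | nil => simp [PySem.List.enumerate_nil, segs]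
  | cons p ps ih =>
    rw [PySem.List.enumerate_cons, List.foldl_cons]
    have hx : ((i : Int) + 1) = ((i + 1 : Nat) : Int) := by push_cast; ring
    have hm : PySem.Int.mod ((i + 1 : Nat) : Int) 2 = (((i + 1) % 2 : Nat) : Int) :=
      PySem.Int.mod_natCast (i + 1) 2
    have hl : i + (p :: ps).length = (i + 1) + ps.length := by simp; ring
    by_cases he : (i + 1) % 2 = 0
    · have hmod : PySem.Int.mod ((i : Int) + 1) 2 = 0 := by
        rw [hx, hm, he]; simp
      by_cases hf : firstOf i = true
      · have hstep : stepB (acc, firstOf i, secondOf i) ((i : Int) + 1, p)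
            = (acc ++ ["</ins>".toList] ++ [p], false, true) := by
          simp [stepB, hf, show (2:Int) ∣ (i:Int)+1 by omega]
        have h1 : secondOf (i + 1) = true := by
          simp only [secondOf, decide_eq_true_iff]
          simp only [firstOf, decide_eq_true_iff] at hf
          omega
        have h2 : firstOf (i + 1) = false := by
          simp only [firstOf, decide_eq_false_iff_not]
          simp only [firstOf, decide_eq_true_iff] at hf
          omega
        have hseg : segs i (p :: ps) = "</ins>".toList :: p :: segs (i + 1) ps := by
          rw [segs, if_pos he, tagN, if_neg (by
            simp only [firstOf, decide_eq_true_iff] at hf; omega)]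
          simp
        rw [hstep, ← h1, ← h2, hx, ih (i + 1) (acc ++ ["</ins>".toList] ++ [p]), hl, hseg]
        simp
      · have hstep : stepB (acc, firstOf i, secondOf i) ((i : Int) + 1, p)
            = (acc ++ ["<ins>".toList] ++ [p], true, false) := by
          simp only [Bool.not_eq_true] at hf
          simp [stepB, hf, show (2:Int) ∣ (i:Int)+1 by omega]
        have hf' : (i / 2) % 2 = 0 := by
          simp only [firstOf, decide_eq_true_iff] at hf; omega
        have h1 : secondOf (i + 1) = false := by
          simp only [secondOf, decide_eq_false_iff_not]; omega
        have h2 : firstOf (i + 1) = true := by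
          simp only [firstOf, decide_eq_true_iff]; omega
        have hseg : segs i (p :: ps) = "<ins>".toList :: p :: segs (i + 1) ps := by
          rw [segs, if_pos he, tagN, if_pos (by omega)]; simp
        rw [hstep, ← h1, ← h2, hx, ih (i + 1) (acc ++ ["<ins>".toList] ++ [p]), hl, hseg]
        simp
    · have hmod : ¬ PySem.Int.mod ((i : Int) + 1) 2 = 0 := by
        rw [hx, hm]
        exact_mod_cast fun h => he (by exact_mod_cast h)
      have hstep : stepB (acc, firstOf i, secondOf i) ((i : Int) + 1, p)
          = (acc ++ [p], firstOf i, secondOf i) := by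
        simp [stepB, show ((i:Int)+1)%2 = 1 by omega]
      have h1 : secondOf (i + 1) = secondOf i := by
        simp only [secondOf]
        have : (i + 1) / 2 = i / 2 ∧ (4 ≤ i + 1 ↔ 4 ≤ i) := by omega
        rw [this.1]
        exact decide_eq_decide.mpr (by rw [this.2])
      have h2 : firstOf (i + 1) = firstOf i := by
        simp only [firstOf]
        have : (i + 1) / 2 = i / 2 := by omega
        rw [this]
      have hseg : segs i (p :: ps) = p :: segs (i + 1) ps := by
        rw [segs, if_neg he, List.nil_append]
      rw [hstep, ← h1, ← h2, hx, ih (i + 1) (acc ++ [p]), hl, hseg]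
      simp
  
lemma join_nil_cons (a : List Char) (as : List (List Char)) :
    PySem.Chars.join [] (a :: as) = a ++ PySem.Chars.join [] as := by
  cases as <;> simp [PySem.Chars.join, List.intercalate]

lemma join_segs (ps : List (List Char)) (i : Nat) :
    PySem.Chars.join [] (segs i ps) = J (i + 1) ps := by
  induction ps generalizing i with
  | nil => simp [segs, J, PySem.Chars.join, List.intercalate]
  | cons p ps ih =>
    rw [segs, J]
    by_cases he : (i + 1) % 2 = 0
    · rw [if_pos he, if_neg (by omega)]
      simp only [List.singleton_append]
      rw [join_nil_cons, join_nil_cons, ih (i + 1), List.append_assoc]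
    · rw [if_neg he, if_pos (by omega)]
      simp only [List.nil_append]
      rw [join_nil_cons, ih (i + 1)]

-- ===== VERDICT (by name: the statement is the Claim_ definition above) =====
theorem compile_strikethrough_spec : Claim_equal_compile_strikethrough := by
  intro line _
  unfold Spec_compile_strikethrough compile_strikethrough compile_strikethrough_alt
  dsimp only
  have hsplit : (PySem.Chars.split? line.toList ['~']).getD [] = sp line.toList := by
    rw [PySem.Chars.split?]
    simp [splitOn_eq_sp]
  rw [hsplit]
  have h0 : ((false, false, ([] : List Char), (0 : Int)) : Bool × Bool × List Char × Int)
      = (secondOf 0, firstOf 0, [], ((0 : Nat) : Int)) := rfl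
  rw [h0, foldA line.toList 0 []]
  have h0' : (([(sp line.toList).headI], false, false) :
      List (List Char) × Bool × Bool) = ([(sp line.toList).headI], firstOf 0, secondOf 0) := rfl
  have h1 : (1 : Int) = ((0 : Nat) : Int) + 1 := rfl
  rw [h0', h1, foldB ((sp line.toList).drop 1) 0 [(sp line.toList).headI]]
  have hlen : (sp line.toList).drop 1 = (sp line.toList).tail := List.drop_one
  have hlen2 : ((sp line.toList).tail).length = line.toList.count '~' := by
    rw [List.length_tail, sp_length]; omega
  dsimp only
  rw [hlen, hlen2]
  set n := line.toList.count '~'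
  by_cases hs : secondOf (0 + n) = true
  · rw [if_pos hs, if_neg (by rw [hs]; simp)]
    rw [List.nil_append, build_eq_sp line.toList 0, List.singleton_append,
      join_nil_cons, join_segs]
  · rw [if_neg hs, if_pos (by simpa using hs)]
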